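-- pv_equiv track=rewrite | github.com/mtwother/chi-square-spell-checker | modified_spell_checker.py | get_letter_freq
-- ===== SOURCE A (Python) =====
-- def get_letter_freq(word):
-- 	freq = {"a": 1, "b": 1, "c": 1, "d": 1, "e": 1, "f": 1, "g": 1, "h": 1,
-- 	         "i": 1, "j": 1, "k": 1, "l": 1, "m": 1, "n": 1, "o": 1, "p": 1,
-- 	         "q": 1, "r": 1, "s": 1, "t": 1, "u": 1, "v": 1, "w": 1, "x": 1,
-- 	         "y": 1, "z": 1}
-- 	for letter in word:
-- 		if letter in "abcdefghijklmnopqrstuvwxyz":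
-- 			freq[letter] += 1
--
-- 	return freq
-- ===== SOURCE B (Python) =====
-- def get_letter_freq(word):
-- 	counts = {}
-- 	for ch in word:
-- 		counts[ch] = counts.get(ch, 0) + 1
-- 	return {c: 1 + counts.get(c, 0) for c in "abcdefghijklmnopqrstuvwxyz"}
-- ===== Notes on version B (the rewrite author's own statement) =====
-- stated objective: simpler
-- what changed: B builds a character-count dict of the whole word in one pass and then constructs the result by a comprehension over the fixed 26-letter alphabet looking each count up, instead of pre-seeding a 26-entry dict and mutating it while filtering the word.
import Mathlib
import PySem

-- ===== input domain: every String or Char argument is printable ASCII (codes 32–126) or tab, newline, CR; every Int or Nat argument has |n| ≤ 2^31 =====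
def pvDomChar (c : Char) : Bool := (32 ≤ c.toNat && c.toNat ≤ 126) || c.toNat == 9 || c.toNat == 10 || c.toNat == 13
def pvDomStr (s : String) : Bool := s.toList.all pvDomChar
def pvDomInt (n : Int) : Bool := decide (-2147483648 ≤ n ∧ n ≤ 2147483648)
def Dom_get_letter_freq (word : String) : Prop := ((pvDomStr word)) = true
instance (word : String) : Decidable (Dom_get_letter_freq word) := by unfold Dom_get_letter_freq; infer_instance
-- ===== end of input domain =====

-- B replaces A's pre-seeded 26-entry dict mutated while scanning the word by a one-pass
-- character counter plus a comprehension over the fixed alphabet (objective: simpler).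

-- ===== PORT A =====
-- Iterating a Python str yields its characters; `letter in "abc…z"` for the 1-character
-- `letter` is exact as character membership, and `freq[letter] += 1` (key present under
-- the guard) is Dict.modify with default 0.
def get_letter_freq (word : String) : List (String × Int) :=
  let freq : PySem.Dict String Int := PySem.Dict.mk
    [("a", 1), ("b", 1), ("c", 1), ("d", 1), ("e", 1), ("f", 1), ("g", 1), ("h", 1),
     ("i", 1), ("j", 1), ("k", 1), ("l", 1), ("m", 1), ("n", 1), ("o", 1), ("p", 1),
     ("q", 1), ("r", 1), ("s", 1), ("t", 1), ("u", 1), ("v", 1), ("w", 1), ("x", 1),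
     ("y", 1), ("z", 1)]
  let freq := word.toList.foldl
    (fun freq letter =>
      if "abcdefghijklmnopqrstuvwxyz".toList.contains letter then
        freq.modify (String.singleton letter) 0 (· + 1)
      else freq) freq
  freq.items

-- ===== PORT B =====
def get_letter_freq_alt (word : String) : List (String × Int) :=
  let counts : PySem.Dict Char Int :=
    word.toList.foldl (fun counts ch => counts.insert ch (counts.getD ch 0 + 1)) PySem.Dict.empty
  "abcdefghijklmnopqrstuvwxyz".toList.map (fun c => (String.singleton c, 1 + counts.getD c 0))

-- ===== PRECONDITION & SPEC =====
def Spec_get_letter_freq (word : String) (out : List (String × Int)) : Prop := out = get_letter_freq_alt word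
instance (word : String) (out : List (String × Int)) : Decidable (Spec_get_letter_freq word out) := by unfold Spec_get_letter_freq; infer_instance

-- ===== CLAIM (what is proved, stated in full; the proofs are below) =====
def Claim_equal_get_letter_freq : Prop := ∀ (word : String), Dom_get_letter_freq word → Spec_get_letter_freq word (get_letter_freq word)

-- ===== LEMMAS AND PROOFS =====

theorem pv_singleton_inj {a b : Char} (h : String.singleton a = String.singleton b) : a = b := by
  have : (String.singleton a).toList = (String.singleton b).toList := by rw [h]
  simpa [String.singleton] using this

-- mapping an entrywise update whose key never occurs is a no-op
theorem pv_map_noop (tl : List (String × Int)) (x : String) (hxtl : x ∉ tl.map Prod.fst)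
    (f : String × Int → String × Int) (hf : ∀ p : String × Int, p.1 ≠ x → f p = p) :
    tl.map f = tl := by
  calc tl.map f = tl.map id := List.map_congr_left (fun p hp => by
        have hpx : p.1 ≠ x := fun h => hxtl (List.mem_map.mpr ⟨p, hp, h⟩)
        simpa using hf p hpx)
    _ = tl := List.map_id tl

-- Dict.modify on a key that is present rewrites exactly that entry, in place.
theorem pv_modify_mk_of_mem (x : String) :
    ∀ (pairs : List (String × Int)), (pairs.map Prod.fst).Nodup → x ∈ pairs.map Prod.fst →
    (PySem.Dict.mk pairs).modify x 0 (· + 1)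
      = PySem.Dict.mk (pairs.map (fun p => if p.1 = x then (p.1, p.2 + 1) else p)) := by
  intro pairs
  induction pairs with
  | nil => intro _ hx; simp at hx
  | cons hd tl ih =>
    intro hnd hx
    rw [List.map_cons] at hnd
    obtain ⟨hhd, hndtl⟩ := List.nodup_cons.mp hnd
    by_cases hk : hd.1 = x
    · -- head is the matched entry; no entry of tl has key x
      have hxtl : x ∉ tl.map Prod.fst := hk ▸ hhd
      have htl : tl.map (fun p => if p.1 = x then (p.1, p.2 + 1) else p) = tl :=
        pv_map_noop tl x hxtl _ (fun p hpx => by simp [hpx])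
      have htl2 : tl.map (fun p => if p.1 = x then (x, hd.2 + 1) else p) = tl :=
        pv_map_noop tl x hxtl _ (fun p hpx => by simp [hpx])
      apply PySem.Dict.ext
      simp [PySem.Dict.modify, PySem.Dict.insert, PySem.Dict.contains, PySem.Dict.getD,
            PySem.Dict.get?, hk, htl, htl2]
    · -- head untouched; recurse into the tail
      have hxtl : x ∈ tl.map Prod.fst := by
        rcases (by simpa using hx : x = hd.1 ∨ x ∈ tl.map Prod.fst) with h | h
        · exact absurd h.symm hk
        · exact h
      have ihx := ih hndtl hxtl
      have hcont : (tl.any fun p => p.1 == x) = true := by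
        rcases List.mem_map.mp hxtl with ⟨p, hp, hpx⟩
        exact List.any_eq_true.mpr ⟨p, hp, by simp [hpx]⟩
      have hitems := congrArg PySem.Dict.items ihx
      apply PySem.Dict.ext
      simpa [PySem.Dict.modify, PySem.Dict.insert, PySem.Dict.contains, PySem.Dict.getD,
             PySem.Dict.get?, hk, Ne.symm hk, hcont] using hitems

-- The per-entry update preserves the key
theorem pv_keys_map_update (x : String) (pairs : List (String × Int)) :
    (pairs.map (fun p => if p.1 = x then (p.1, p.2 + 1) else p)).map Prod.fst
      = pairs.map Prod.fst := by
  rw [List.map_map]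
  apply List.map_congr_left
  intro p _
  by_cases h : p.1 = x <;> simp [h]

-- A counting loop of Dict.modify over keys that all pre-exist rewrites the items list pointwise.
theorem pv_foldl_modify_items :
    ∀ (l : List String) (pairs : List (String × Int)), (pairs.map Prod.fst).Nodup →
    (∀ x ∈ l, x ∈ pairs.map Prod.fst) →
    (l.foldl (fun d x => d.modify x 0 (· + 1)) (PySem.Dict.mk pairs)).items
      = pairs.map (fun p => (p.1, p.2 + (l.count p.1 : Int))) := by
  intro l
  induction l with
  | nil =>
    intro pairs _ _
    simp
  | cons x t ih =>
    intro pairs hnd hmem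
    have hx : x ∈ pairs.map Prod.fst := hmem x (by simp)
    rw [List.foldl_cons, pv_modify_mk_of_mem x pairs hnd hx]
    have hnd' : ((pairs.map (fun p => if p.1 = x then (p.1, p.2 + 1) else p)).map Prod.fst).Nodup := by
      rw [pv_keys_map_update]; exact hnd
    have hmem' : ∀ y ∈ t, y ∈ (pairs.map (fun p => if p.1 = x then (p.1, p.2 + 1) else p)).map Prod.fst := by
      intro y hy; rw [pv_keys_map_update]; exact hmem y (by simp [hy])
    rw [ih _ hnd' hmem', List.map_map]
    apply List.map_congr_left
    intro p _
    by_cases h : p.1 = x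
    · have hbx : (x == p.1) = true := by simpa using h.symm
      simp only [Function.comp, if_pos h, List.count_cons, hbx, if_true, Prod.mk.injEq]
      refine ⟨by trivial, ?_⟩
      push_cast
      omega
    · have hbx : ¬ (x == p.1) = true := by simpa using fun hh : x = p.1 => h hh.symm
      simp only [Function.comp, if_neg h, List.count_cons, if_neg hbx, Prod.mk.injEq]
      simp

-- A's guarded loop is the plain counting loop over the filtered-and-embedded word.
theorem pv_foldl_if_eq_filterMap (l : List Char) :
    ∀ (d : PySem.Dict String Int),
    l.foldl (fun d letter =>
        if "abcdefghijklmnopqrstuvwxyz".toList.contains letter then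
          d.modify (String.singleton letter) 0 (· + 1)
        else d) d
      = (l.filterMap (fun c =>
          if "abcdefghijklmnopqrstuvwxyz".toList.contains c then some (String.singleton c)
          else none)).foldl (fun d x => d.modify x 0 (· + 1)) d := by
  induction l with
  | nil => intro d; simp
  | cons c t ih =>
    intro d
    rw [List.foldl_cons, List.filterMap_cons]
    by_cases h : "abcdefghijklmnopqrstuvwxyz".toList.contains c
    · rw [if_pos h, if_pos h, List.foldl_cons, ih]
    · rw [if_neg h, if_neg h, ih]

-- in the filtered-and-embedded word, a lowercase letter occurs as often as in the word
theorem pv_count_filterMap (c : Char)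
    (hc : c ∈ "abcdefghijklmnopqrstuvwxyz".toList) (l : List Char) :
    (l.filterMap (fun c =>
        if "abcdefghijklmnopqrstuvwxyz".toList.contains c then some (String.singleton c)
        else none)).count (String.singleton c) = l.count c := by
  induction l with
  | nil => simp
  | cons a t ih =>
    rw [List.filterMap_cons]
    by_cases ha : "abcdefghijklmnopqrstuvwxyz".toList.contains a
    · rw [if_pos ha, List.count_cons, List.count_cons, ih]
      by_cases hac : a = c
      · subst hac; simp
      · have h1 : ¬ (String.singleton a == String.singleton c) = true := by
          simp only [beq_iff_eq]
          exact fun h => hac (pv_singleton_inj h)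
        have h2 : ¬ (a == c) = true := by simpa using hac
        rw [if_neg h1, if_neg h2]
    · rw [if_neg ha]
      dsimp only
      have h2 : ¬ (a == c) = true := by
        simp only [beq_iff_eq]
        rintro rfl
        exact ha (by simpa using hc)
      rw [List.count_cons, if_neg h2, ih]
      simp

-- The 26 seed pairs are the alphabet letters, each with value 1.
theorem pv_pairs0_eq :
    [(("a":String), (1:Int)), ("b", 1), ("c", 1), ("d", 1), ("e", 1), ("f", 1), ("g", 1), ("h", 1),
     ("i", 1), ("j", 1), ("k", 1), ("l", 1), ("m", 1), ("n", 1), ("o", 1), ("p", 1),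
     ("q", 1), ("r", 1), ("s", 1), ("t", 1), ("u", 1), ("v", 1), ("w", 1), ("x", 1),
     ("y", 1), ("z", 1)]
      = "abcdefghijklmnopqrstuvwxyz".toList.map (fun c => (String.singleton c, (1:Int))) := by
  decide

theorem pv_pairs0_nodup :
    (("abcdefghijklmnopqrstuvwxyz".toList.map (fun c => (String.singleton c, (1:Int)))).map Prod.fst).Nodup := by
  decide

-- B's counter dict reads back the character count of the word.
theorem pv_counts_getD (word : String) (c : Char) :
    (word.toList.foldl (fun counts ch => counts.insert ch (counts.getD ch 0 + 1))
        PySem.Dict.empty).getD c 0 = (word.toList.count c : Int) := by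
  rw [PySem.Dict.getD_foldl_insert_add_one]
  simp [PySem.Dict.empty, PySem.Dict.getD, PySem.Dict.get?]

-- ===== VERDICT (by name: the statement is the Claim_ definition above) =====
theorem get_letter_freq_spec : Claim_equal_get_letter_freq := by
  intro word _
  unfold Spec_get_letter_freq get_letter_freq get_letter_freq_alt
  dsimp only
  rw [pv_pairs0_eq, pv_foldl_if_eq_filterMap]
  rw [pv_foldl_modify_items _ _ pv_pairs0_nodup]
  · rw [List.map_map]
    apply List.map_congr_left
    intro c hc
    dsimp only [Function.comp]
    rw [pv_count_filterMap c hc, pv_counts_getD]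
  · intro x hx
    rcases List.mem_filterMap.mp hx with ⟨a, ha, hax⟩
    by_cases h : "abcdefghijklmnopqrstuvwxyz".toList.contains a
    · rw [if_pos h] at hax
      rw [List.map_map]
      refine List.mem_map.mpr ⟨a, by simpa using h, by simpa using hax⟩
    · rw [if_neg h] at hax; exact absurd hax (by simp)
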